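-- pv_equiv track=rewrite | github.com/ngtuetam/DLtest | Recursive Algo/countQueen.py | isQueen
-- ===== SOURCE A (Python) =====
-- def ismaxDirection(a,n,row,col,x,y):
-- 	i = row
-- 	j = col
-- 	while 0<= i <n and 0<= j <n:
-- 		if a[i][j] > a[row][col]:
-- 			return False
-- 		i+=x
-- 		j+=y
-- 	return True
--
-- def isQueen(a,n,row,col):
-- 	#Kiem tra phan tu lon nhat tren hang
-- 	for j in range(n):
-- 		if a[row][j] > a[row][col]:
-- 			return False
-- 	#Kiem tra phan tu lon nhat tren cot
-- 	for i in range(n):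
-- 		if a[i][col] > a[row][col]:
-- 			return False
-- 	#Kiem tra theo 4 huong
-- 	dr1 = ismaxDirection(a,n,row,col,-1,-1)
-- 	dr2 = ismaxDirection(a,n,row,col,-1,1)
-- 	dr3 = ismaxDirection(a,n,row,col,1,-1)
-- 	dr4 = ismaxDirection(a,n,row,col,1,1)
-- 	return dr1 and dr2 and dr3 and dr4
-- ===== SOURCE B (Python) =====
-- def isQueen(a, n, row, col):
--     # Full-board scan: a cell matters iff it shares the row, the column or a
--     # diagonal with (row, col); check every such cell against a[row][col].
--     return all(a[i][j] <= a[row][col]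
--                for i in range(n) for j in range(n)
--                if i == row or j == col or abs(i - row) == abs(j - col))
-- ===== Notes on version B (the rewrite author's own statement) =====
-- stated objective: alternative
-- what changed: A walks the row, the column and four diagonal rays with early returns; B instead scans the whole n x n board once and tests only the cells whose coordinates satisfy the line-membership predicate (i==row or j==col or |i-row|==|j-col|) against a[row][col]; it trades the O(n) ray walks for an O(n^2) predicate scan.
-- outside the precondition, e.g. on isQueen([[1, 2], [3, 4]], 2, -1, 0): A returns False, B returns True
import Mathlib
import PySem

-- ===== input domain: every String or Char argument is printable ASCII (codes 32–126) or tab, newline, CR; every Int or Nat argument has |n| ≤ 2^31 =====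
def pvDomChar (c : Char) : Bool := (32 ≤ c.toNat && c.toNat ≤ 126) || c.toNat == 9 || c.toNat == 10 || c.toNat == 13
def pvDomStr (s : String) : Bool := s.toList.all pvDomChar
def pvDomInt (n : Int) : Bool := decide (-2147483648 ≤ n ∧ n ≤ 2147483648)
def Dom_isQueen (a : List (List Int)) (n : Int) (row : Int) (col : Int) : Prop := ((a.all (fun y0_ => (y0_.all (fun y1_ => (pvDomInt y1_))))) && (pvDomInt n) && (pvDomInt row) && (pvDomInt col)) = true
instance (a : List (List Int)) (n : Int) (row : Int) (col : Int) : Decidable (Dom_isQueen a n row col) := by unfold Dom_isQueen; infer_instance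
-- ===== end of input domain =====

-- B replaces A's six directional walks (row loop, column loop, four diagonal rays with
-- early returns) by one scan of the whole n×n board filtered by the line-membership
-- predicate i=row ∨ j=col ∨ |i-row|=|j-col| (objective: alternative; B is O(n²) vs A's O(n)).

-- a[i][j] with Python indexing; under Pre_ every access is in range, so the default 0 is unreachable
def pvGet2 (a : List (List Int)) (i j : Int) : Int :=
  (((PySem.List.pyGet? a i).bind (fun r => PySem.List.pyGet? r j)).getD 0)

-- ===== PORT A =====
-- while-loop of ismaxDirection; fuel: for A's calls (x,y = ±1 from an in-range start)
-- the loop runs at most n in-range iterations, so fuel n.toNat+1 is exact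
def ismaxAux (a : List (List Int)) (n row col x y : Int) : Nat → Int → Int → Bool
  | 0, _, _ => true
  | Nat.succ f, i, j =>
    if 0 ≤ i ∧ i < n ∧ 0 ≤ j ∧ j < n then
      if pvGet2 a i j > pvGet2 a row col then false
      else ismaxAux a n row col x y f (i + x) (j + y)
    else true

def ismaxDirection (a : List (List Int)) (n row col x y : Int) : Bool :=
  ismaxAux a n row col x y (n.toNat + 1) row col

def isQueen (a : List (List Int)) (n : Int) (row : Int) (col : Int) : Bool :=
  if (PySem.List.pyRange 0 n 1).any (fun j => pvGet2 a row j > pvGet2 a row col) then false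
  else if (PySem.List.pyRange 0 n 1).any (fun i => pvGet2 a i col > pvGet2 a row col) then false
  else
    let dr1 := ismaxDirection a n row col (-1) (-1)
    let dr2 := ismaxDirection a n row col (-1) 1
    let dr3 := ismaxDirection a n row col 1 (-1)
    let dr4 := ismaxDirection a n row col 1 1
    dr1 && dr2 && dr3 && dr4

-- ===== PORT B =====
-- Source B's filtered full-board generator: the inner `if` is the comprehension's filter
def isQueen_alt (a : List (List Int)) (n : Int) (row : Int) (col : Int) : Bool :=
  (PySem.List.pyRange 0 n 1).all (fun i =>
    (PySem.List.pyRange 0 n 1).all (fun j =>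
      if i = row ∨ j = col ∨ (i - row).natAbs = (j - col).natAbs
      then pvGet2 a i j ≤ pvGet2 a row col
      else true))

-- ===== PRECONDITION & SPEC =====
-- Pre_ restricts to the natural domain: either n ≤ 0 (A trivially returns True with no
-- board access) or an n×n board region with 0 ≤ row,col < n; it excludes inputs where
-- A raises (board smaller than n) and inputs where row/col lie outside [0,n), on which
-- A's returned value rests on Python's accidental negative-index wraparound or on cells
-- outside the n×n region.
def Pre_isQueen (a : List (List Int)) (n : Int) (row : Int) (col : Int) : Prop :=
  n ≤ 0 ∨ (0 ≤ row ∧ row < n ∧ 0 ≤ col ∧ col < n ∧ n ≤ (a.length : Int) ∧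
    ∀ r ∈ a.take n.toNat, n ≤ (r.length : Int))
instance (a : List (List Int)) (n : Int) (row : Int) (col : Int) : Decidable (Pre_isQueen a n row col) := by unfold Pre_isQueen; infer_instance

def pvWitness_isQueen : List (List Int) × Int × Int × Int := ([[1, 2], [3, 4]], 2, 1, 1)

def Spec_isQueen (a : List (List Int)) (n : Int) (row : Int) (col : Int) (out : Bool) : Prop := out = isQueen_alt a n row col
instance (a : List (List Int)) (n : Int) (row : Int) (col : Int) (out : Bool) : Decidable (Spec_isQueen a n row col out) := by unfold Spec_isQueen; infer_instance

-- ===== CLAIM (what is proved, stated in full; the proofs are below) =====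
def Claim_equal_isQueen : Prop := ∀ (a : List (List Int)) (n : Int) (row : Int) (col : Int), Dom_isQueen a n row col → Pre_isQueen a n row col → Spec_isQueen a n row col (isQueen a n row col)

-- ===== LEMMAS AND PROOFS =====

-- the common specification: every in-bounds cell sharing a line with (row,col) is ≤ the cell
def QueenProp (a : List (List Int)) (n row col : Int) : Prop :=
  ∀ i j : Int, 0 ≤ i → i < n → 0 ≤ j → j < n →
    (i = row ∨ j = col ∨ (i - row).natAbs = (j - col).natAbs) →
    pvGet2 a i j ≤ pvGet2 a row col

-- B = true ↔ QueenProp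
lemma alt_iff (a : List (List Int)) (n row col : Int) :
    isQueen_alt a n row col = true ↔ QueenProp a n row col := by
  unfold isQueen_alt QueenProp
  simp only [List.all_eq_true, PySem.List.mem_pyRange_one, and_imp]
  constructor
  · intro h i j hi1 hi2 hj1 hj2 hc
    have := h i hi1 hi2 j hj1 hj2
    rw [if_pos hc] at this
    exact of_decide_eq_true this
  · intro h i hi1 hi2 j hj1 hj2
    by_cases hc : i = row ∨ j = col ∨ (i - row).natAbs = (j - col).natAbs
    · rw [if_pos hc]; exact decide_eq_true (h i j hi1 hi2 hj1 hj2 hc)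
    · rw [if_neg hc]

-- A's while loop, characterised: true iff every cell reached through an in-bounds chain is ≤ v
lemma ismaxAux_iff (a : List (List Int)) (n row col x y : Int) :
    ∀ (f : Nat) (i j : Int),
      ismaxAux a n row col x y f i j = true ↔
        ∀ t : Nat, t < f →
          (∀ s : Nat, s ≤ t → 0 ≤ i + s*x ∧ i + s*x < n ∧ 0 ≤ j + s*y ∧ j + s*y < n) →
          pvGet2 a (i + t*x) (j + t*y) ≤ pvGet2 a row col := by
  intro f
  induction f with
  | zero => intro i j; simp [ismaxAux]
  | succ f ih =>
    intro i j
    simp only [ismaxAux]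
    split_ifs with hin hgt
    · -- in bounds, strictly greater: loop returns False, and t = 0 refutes the RHS
      simp only [false_iff]
      intro h
      have h0 := h 0 (Nat.succ_pos f) (by intro s hs; interval_cases s; simpa using hin)
      simp at h0
      omega
    · -- in bounds, ≤ v: recurse
      rw [ih]
      constructor
      · intro h t ht hch
        cases t with
        | zero => simpa using not_lt.mp hgt
        | succ t =>
          have hch' : ∀ s : Nat, s ≤ t → 0 ≤ (i+x) + s*x ∧ (i+x) + s*x < n ∧
              0 ≤ (j+y) + s*y ∧ (j+y) + s*y < n := by
            intro s hs
            have := hch (s+1) (by omega)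
            have e1 : i + ((s:Nat)+1 : Nat)*x = (i+x) + s*x := by push_cast; ring
            have e2 : j + ((s:Nat)+1 : Nat)*y = (j+y) + s*y := by push_cast; ring
            rw [e1, e2] at this
            exact this
          have := h t (by omega) hch'
          have e1 : (i+x) + (t:Nat)*x = i + ((t:Nat)+1 : Nat)*x := by push_cast; ring
          have e2 : (j+y) + (t:Nat)*y = j + ((t:Nat)+1 : Nat)*y := by push_cast; ring
          rw [e1, e2] at this
          exact this
      · intro h t ht hch
        have hch' : ∀ s : Nat, s ≤ t+1 → 0 ≤ i + s*x ∧ i + s*x < n ∧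
            0 ≤ j + s*y ∧ j + s*y < n := by
          intro s hs
          cases s with
          | zero => simpa using hin
          | succ s =>
            have := hch s (by omega)
            have e1 : (i+x) + (s:Nat)*x = i + ((s:Nat)+1 : Nat)*x := by push_cast; ring
            have e2 : (j+y) + (s:Nat)*y = j + ((s:Nat)+1 : Nat)*y := by push_cast; ring
            rw [e1, e2] at this
            exact this
        have := h (t+1) (by omega) hch'
        have e1 : i + ((t:Nat)+1 : Nat)*x = (i+x) + t*x := by push_cast; ring
        have e2 : j + ((t:Nat)+1 : Nat)*y = (j+y) + t*y := by push_cast; ring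
        rw [e1, e2] at this
        exact this
    · -- out of bounds: True, and the RHS is vacuous (the chain fails already at s = 0)
      simp only [true_iff]
      intro t ht hch
      exfalso
      have := hch 0 (Nat.zero_le t)
      simp at this
      omega

-- for A's four diagonal calls (x,y = ±1, in-range start) the chain condition collapses
-- to in-boundedness of the end cell, and fuel n.toNat+1 suffices
lemma ismaxDirection_iff (a : List (List Int)) (n row col x y : Int)
    (hx : x = 1 ∨ x = -1) (hy : y = 1 ∨ y = -1)
    (h1 : 0 ≤ row) (h2 : row < n) (h3 : 0 ≤ col) (h4 : col < n) :
    ismaxDirection a n row col x y = true ↔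
      ∀ t : Nat, 0 ≤ row + t*x → row + t*x < n → 0 ≤ col + t*y → col + t*y < n →
        pvGet2 a (row + t*x) (col + t*y) ≤ pvGet2 a row col := by
  rw [ismaxDirection, ismaxAux_iff]
  constructor
  · intro h t ha hb hc hd
    have hfuel : t < n.toNat + 1 := by rcases hx with rfl | rfl <;> omega
    refine h t hfuel ?_
    intro s hs
    have hsi : (s:Int) ≤ (t:Int) := by exact_mod_cast hs
    rcases hx with rfl | rfl <;> rcases hy with rfl | rfl <;>
      refine ⟨?_, ?_, ?_, ?_⟩ <;> omega
  · intro h t _ hch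
    have := hch t (le_refl t)
    exact h t this.1 this.2.1 this.2.2.1 this.2.2.2

-- A = true ↔ QueenProp, on the in-range part of Pre_
lemma a_iff (a : List (List Int)) (n row col : Int)
    (h1 : 0 ≤ row) (h2 : row < n) (h3 : 0 ≤ col) (h4 : col < n) :
    isQueen a n row col = true ↔ QueenProp a n row col := by
  have hsplit : isQueen a n row col = true ↔
      ((PySem.List.pyRange 0 n 1).any (fun j => pvGet2 a row j > pvGet2 a row col) = false ∧
       (PySem.List.pyRange 0 n 1).any (fun i => pvGet2 a i col > pvGet2 a row col) = false ∧
       ismaxDirection a n row col (-1) (-1) = true ∧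
       ismaxDirection a n row col (-1) 1 = true ∧
       ismaxDirection a n row col 1 (-1) = true ∧
       ismaxDirection a n row col 1 1 = true) := by
    unfold isQueen
    split_ifs with ha hb
    · simp [ha]
    · simp [ha, hb]
    · simp [ha, hb, and_assoc]
  rw [hsplit,
    ismaxDirection_iff a n row col (-1) (-1) (Or.inr rfl) (Or.inr rfl) h1 h2 h3 h4,
    ismaxDirection_iff a n row col (-1) 1 (Or.inr rfl) (Or.inl rfl) h1 h2 h3 h4,
    ismaxDirection_iff a n row col 1 (-1) (Or.inl rfl) (Or.inr rfl) h1 h2 h3 h4,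
    ismaxDirection_iff a n row col 1 1 (Or.inl rfl) (Or.inl rfl) h1 h2 h3 h4]
  simp only [List.any_eq_false, PySem.List.mem_pyRange_one, and_imp,
    decide_eq_true_eq, not_lt]
  constructor
  · rintro ⟨hrow, hcol, dmm, dmp, dpm, dpp⟩ i j hi1 hi2 hj1 hj2 hc
    rcases hc with rfl | rfl | habs
    · exact hrow j hj1 hj2
    · exact hcol i hi1 hi2
    · by_cases hir : i ≤ row
      · by_cases hjc : j ≤ col
        · -- up-left: x = y = -1 with t = row - i
          have := dmm (row - i).toNat
          have e1 : row + ((row - i).toNat : Int)*(-1) = i := by omega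
          have e2 : col + ((row - i).toNat : Int)*(-1) = j := by omega
          rw [e1, e2] at this
          exact this hi1 hi2 hj1 hj2
        · -- up-right: x = -1, y = 1
          have := dmp (row - i).toNat
          have e1 : row + ((row - i).toNat : Int)*(-1) = i := by omega
          have e2 : col + ((row - i).toNat : Int)*1 = j := by omega
          rw [e1, e2] at this
          exact this hi1 hi2 hj1 hj2
      · by_cases hjc : j ≤ col
        · -- down-left: x = 1, y = -1
          have := dpm (i - row).toNat
          have e1 : row + ((i - row).toNat : Int)*1 = i := by omega
          have e2 : col + ((i - row).toNat : Int)*(-1) = j := by omega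
          rw [e1, e2] at this
          exact this hi1 hi2 hj1 hj2
        · -- down-right: x = y = 1
          have := dpp (i - row).toNat
          have e1 : row + ((i - row).toNat : Int)*1 = i := by omega
          have e2 : col + ((i - row).toNat : Int)*1 = j := by omega
          rw [e1, e2] at this
          exact this hi1 hi2 hj1 hj2
  · intro h
    exact ⟨fun j hj1 hj2 => h row j h1 h2 hj1 hj2 (Or.inl rfl),
           fun i hi1 hi2 => h i col hi1 hi2 h3 h4 (Or.inr (Or.inl rfl)),
           fun t ha hb hc hd => h _ _ ha hb hc hd (Or.inr (Or.inr (by omega))),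
           fun t ha hb hc hd => h _ _ ha hb hc hd (Or.inr (Or.inr (by omega))),
           fun t ha hb hc hd => h _ _ ha hb hc hd (Or.inr (Or.inr (by omega))),
           fun t ha hb hc hd => h _ _ ha hb hc hd (Or.inr (Or.inr (by omega)))⟩

-- ===== VERDICT (by name: the statement is the Claim_ definition above) =====
theorem isQueen_spec : Claim_equal_isQueen := by
  intro a n row col _ hpre
  unfold Spec_isQueen
  rcases hpre with hn | ⟨h1, h2, h3, h4, _, _⟩
  · have hIR : ∀ i j : Int, ¬(0 ≤ i ∧ i < n ∧ 0 ≤ j ∧ j < n) := by intro i j; omega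
    simp [isQueen, isQueen_alt, ismaxDirection, ismaxAux, hIR,
      PySem.List.pyRange_one_eq_nil hn]
  · have hA := a_iff a n row col h1 h2 h3 h4
    have hB := alt_iff a n row col
    have : (isQueen a n row col = true) ↔ (isQueen_alt a n row col = true) :=
      hA.trans hB.symm
    cases hq : isQueen a n row col <;> cases hq' : isQueen_alt a n row col <;> simp_all
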